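-- pv_equiv track=rewrite | github.com/vovw/nano-vllm | nanovllm/utils/loader.py | _expected_shard_count
-- ===== SOURCE A (Python) =====
-- from typing import Any
--
-- def _expected_shard_count(param_name: str, packed_mapping: dict[str, tuple[str, Any]]) -> int | None:
--     target_name = None
--     for _, (target, _) in packed_mapping.items():
--         if target in param_name:
--             target_name = target
--             break
--     if target_name is None:
--         return None
--     shard_ids = {
--         shard_id for _, (target, shard_id) in packed_mapping.items() if target == target_name
--     }
--     return len(shard_ids) if shard_ids else None
-- ===== SOURCE B (Python) =====
-- def _expected_shard_count(param_name: str, packed_mapping):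
--     # Group once: target -> set of shard ids, in first-appearance order of targets.
--     index = {}
--     for _, (target, shard_id) in packed_mapping.items():
--         index.setdefault(target, set()).add(shard_id)
--     for target, ids in index.items():
--         if target in param_name:
--             return len(ids)
--     return None
-- ===== Notes on version B (the rewrite author's own statement) =====
-- stated objective: alternative
-- what changed: B replaces A's two scans of the mapping (a break-loop to find the matching target, then a second full scan building the set of its shard ids) by a single grouping pass into a dict target -> set of shard ids followed by a lookup over the dict's keys in first-appearance order.
import Mathlib
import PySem

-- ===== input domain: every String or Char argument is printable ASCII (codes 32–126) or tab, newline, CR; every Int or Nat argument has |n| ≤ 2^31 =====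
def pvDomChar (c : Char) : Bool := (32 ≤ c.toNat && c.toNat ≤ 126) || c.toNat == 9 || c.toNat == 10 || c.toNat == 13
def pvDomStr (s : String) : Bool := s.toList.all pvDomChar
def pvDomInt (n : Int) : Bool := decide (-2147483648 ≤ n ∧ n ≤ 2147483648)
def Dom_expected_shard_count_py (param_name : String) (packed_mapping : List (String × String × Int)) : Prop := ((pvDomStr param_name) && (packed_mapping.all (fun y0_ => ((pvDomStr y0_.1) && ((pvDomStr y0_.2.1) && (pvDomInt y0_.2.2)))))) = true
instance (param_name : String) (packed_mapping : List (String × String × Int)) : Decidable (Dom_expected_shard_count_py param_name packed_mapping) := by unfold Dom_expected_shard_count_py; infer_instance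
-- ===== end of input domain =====

-- B replaces A's two scans (find the target, then re-scan to collect its shard ids) by one
-- grouping pass into a dict target → set-of-ids followed by a lookup over the dict; same results.

-- ===== PORT A =====
-- first loop of A: find the first target that is a substring of param_name (break)
def pvFindTarget (param_name : String) : List (String × String × Int) → Option String
  | [] => none
  | (_, t, _) :: rest =>
      if PySem.Str.isIn t param_name then some t else pvFindTarget param_name rest

-- A's set comprehension: fold over all items, adding shard_id when target == target_name
def pvCollect (target_name : String) (pm : List (String × String × Int))
    (s : PySem.Set Int) : PySem.Set Int :=
  pm.foldl (fun s e => if e.2.1 == target_name then PySem.Set.add s e.2.2 else s) s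

def expected_shard_count_py (param_name : String) (packed_mapping : List (String × String × Int)) : Option Int :=
  match pvFindTarget param_name packed_mapping with
  | none => none
  | some target_name =>
      let shard_ids := pvCollect target_name packed_mapping PySem.Set.empty
      if shard_ids.isEmpty then none else some (shard_ids.length : Int)

-- ===== PORT B =====
-- grouping pass: index.setdefault(target, set()).add(shard_id)
def pvBuildIndex (pm : List (String × String × Int)) : PySem.Dict String (PySem.Set Int) :=
  pm.foldl (fun d e => d.insert e.2.1 (PySem.Set.add (d.getD e.2.1 PySem.Set.empty) e.2.2))
    PySem.Dict.empty

-- lookup pass: first indexed target that is a substring of param_name (return inside the loop)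
def pvLookupIndex (param_name : String) : List (String × PySem.Set Int) → Option Int
  | [] => none
  | (t, ids) :: rest =>
      if PySem.Str.isIn t param_name then some (ids.length : Int)
      else pvLookupIndex param_name rest

def expected_shard_count_py_alt (param_name : String) (packed_mapping : List (String × String × Int)) : Option Int :=
  pvLookupIndex param_name (pvBuildIndex packed_mapping).items

-- ===== PRECONDITION & SPEC =====
def Spec_expected_shard_count_py (param_name : String) (packed_mapping : List (String × String × Int)) (out : Option Int) : Prop := out = expected_shard_count_py_alt param_name packed_mapping
instance (param_name : String) (packed_mapping : List (String × String × Int)) (out : Option Int) : Decidable (Spec_expected_shard_count_py param_name packed_mapping out) := by unfold Spec_expected_shard_count_py; infer_instance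

-- ===== CLAIM (what is proved, stated in full; the proofs are below) =====
def Claim_equal_expected_shard_count_py : Prop := ∀ (param_name : String) (packed_mapping : List (String × String × Int)), Dom_expected_shard_count_py param_name packed_mapping → Spec_expected_shard_count_py param_name packed_mapping (expected_shard_count_py param_name packed_mapping)

-- ===== LEMMAS AND PROOFS =====

theorem pvLookupIndex_eq_find (pn : String) (l : List (String × PySem.Set Int)) :
    pvLookupIndex pn l
      = (l.find? (fun kv => PySem.Str.isIn kv.1 pn)).map (fun kv => (kv.2.length : Int)) := by
  induction l with
  | nil => rfl
  | cons kv rest ih =>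
      obtain ⟨t, ids⟩ := kv
      by_cases h : PySem.Str.isIn t pn
      all_goals simp only [PySem.Str.isIn] at h
      · simp [pvLookupIndex, List.find?, h]
      · simp [pvLookupIndex, List.find?, h, ih]

theorem pvFindTarget_eq_find (pn : String) (pm : List (String × String × Int)) :
    pvFindTarget pn pm
      = (pm.find? (fun e => PySem.Str.isIn e.2.1 pn)).map (fun e => e.2.1) := by
  induction pm with
  | nil => rfl
  | cons e rest ih =>
      obtain ⟨k, t, sid⟩ := e
      by_cases h : PySem.Str.isIn t pn
      all_goals simp only [PySem.Str.isIn] at h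
      · simp [pvFindTarget, List.find?, h]
      · simp [pvFindTarget, List.find?, h, ih]

theorem pvSetAdd_ne_nil (s : PySem.Set Int) (x : Int) : PySem.Set.add s x ≠ [] := by
  simp only [PySem.Set.add]
  split_ifs with hc
  · exact List.ne_nil_of_mem (List.contains_iff_mem.mp hc)
  · simp

theorem pvCollect_ne_nil_of_ne_nil (t : String) (pm : List (String × String × Int))
    (s : PySem.Set Int) (hs : s ≠ []) : pvCollect t pm s ≠ [] := by
  induction pm generalizing s with
  | nil => exact hs
  | cons e rest ih =>
      simp only [pvCollect, List.foldl_cons]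
      by_cases h : e.2.1 == t
      · simp only [h, if_pos]
        exact ih _ (pvSetAdd_ne_nil _ _)
      · simp only [h]
        exact ih _ hs

theorem pvCollect_ne_nil_of_mem (t : String) (pm : List (String × String × Int))
    (s : PySem.Set Int) (e : String × String × Int) (he : e ∈ pm) (ht : e.2.1 = t) :
    pvCollect t pm s ≠ [] := by
  induction pm generalizing s with
  | nil => cases he
  | cons e' rest ih =>
      simp only [pvCollect, List.foldl_cons]
      rcases List.mem_cons.mp he with rfl | hmem
      · rw [ht]
        simp only [beq_self_eq_true, if_pos]
        exact pvCollect_ne_nil_of_ne_nil _ _ _ (pvSetAdd_ne_nil _ _)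
      · by_cases h : e'.2.1 == t
        · simp only [h, if_pos]
          exact pvCollect_ne_nil_of_ne_nil _ _ _ (pvSetAdd_ne_nil _ _)
        · simp only [h]
          exact ih _ hmem

-- the grouping loop, related to A's two scans, generalized over the starting dict
theorem pvMapFind (pn t : String) (s' : PySem.Set Int) (l : List (String × PySem.Set Int)) :
    (l.map (fun p => if p.1 == t then (t, s') else p)).find? (fun kv => PySem.Str.isIn kv.1 pn)
      = (l.find? (fun kv => PySem.Str.isIn kv.1 pn)).map (fun p => if p.1 == t then (t, s') else p) := by
  induction l with
  | nil => rfl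
  | cons p l ih =>
      simp only [List.map_cons, List.find?_cons]
      have hkey : PySem.Str.isIn (if p.1 == t then (t, s') else p).1 pn = PySem.Str.isIn p.1 pn := by
        by_cases h : p.1 == t
        · rw [if_pos h, eq_of_beq h]
        · rw [if_neg h]
      simp only [hkey]
      cases hp : PySem.Str.isIn p.1 pn with
      | true => rfl
      | false => simp only [ih]

theorem pvKey (pn : String) (pm : List (String × String × Int)) :
    ∀ d : PySem.Dict String (PySem.Set Int), d.keys.Nodup →
    pvLookupIndex pn
        (pm.foldl (fun d e => d.insert e.2.1 (PySem.Set.add (d.getD e.2.1 PySem.Set.empty) e.2.2)) d).items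
      = match d.items.find? (fun kv => PySem.Str.isIn kv.1 pn) with
        | some kv => some ((pvCollect kv.1 pm kv.2).length : Int)
        | none =>
          match pm.find? (fun e => PySem.Str.isIn e.2.1 pn) with
          | none => none
          | some e => some ((pvCollect e.2.1 pm PySem.Set.empty).length : Int) := by
  induction pm with
  | nil =>
      intro d _
      simp only [List.foldl_nil, pvLookupIndex_eq_find, List.find?_nil]
      cases d.items.find? (fun kv => PySem.Str.isIn kv.1 pn) <;> rfl
  | cons e rest ih =>
      intro d hnd
      obtain ⟨k, t, sid⟩ := e
      simp only [List.foldl_cons]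
      rw [ih _ (PySem.Dict.nodup_keys_insert _ _ _ hnd)]
      by_cases hc : d.contains t = true
      · -- existing key: items are mapped in place
        rw [PySem.Dict.items_insert_of_contains d _ hc, pvMapFind]
        cases hfd : d.items.find? (fun kv => PySem.Str.isIn kv.1 pn) with
        | some kv =>
            obtain ⟨kt, ks⟩ := kv
            have hmem : (kt, ks) ∈ d.items := List.mem_of_find?_eq_some hfd
            by_cases hkt : kt = t
            · subst hkt
              have hgetD : d.getD kt [] = ks := PySem.Dict.getD_of_mem_items d hmem hnd PySem.Set.empty
              simp only [Option.map_some, beq_self_eq_true, if_pos]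
              simp [pvCollect, hgetD]
            · have hkt' : (kt == t) = false := beq_eq_false_iff_ne.mpr hkt
              simp only [Option.map_some, hkt', Bool.false_eq_true, if_false]
              simp [pvCollect, Ne.symm hkt]
        | none =>
            simp only [Option.map_none]
            have htno : PySem.Str.isIn t pn = false := by
              obtain ⟨p, hpmem, hpk⟩ := List.mem_map.mp ((PySem.Dict.contains_iff_mem_keys d t).mp hc)
              have hnp := List.find?_eq_none.mp hfd p hpmem
              rw [hpk] at hnp
              exact Bool.eq_false_iff.mpr hnp
            simp only [List.find?_cons, htno]
            cases hre : rest.find? (fun e => PySem.Str.isIn e.2.1 pn) with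
            | none => rfl
            | some e' =>
                have hne : t ≠ e'.2.1 := by
                  intro hEq
                  have hp := List.find?_some hre
                  simp only at hp
                  rw [← hEq, htno] at hp
                  exact Bool.false_ne_true hp
                simp [pvCollect, hne]
      · -- fresh key: items are appended
        have hc' : d.contains t = false := by cases h : d.contains t; rfl; exact absurd h hc
        rw [PySem.Dict.items_insert_of_not_contains d _ hc', List.find?_append,
            PySem.Dict.getD_of_not_contains d _ hc']
        cases hfd : d.items.find? (fun kv => PySem.Str.isIn kv.1 pn) with
        | some kv =>
            simp only [Option.some_or]
            have hkt : t ≠ kv.1 := by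
              intro hEq
              have hmem : (kv.1, kv.2) ∈ d.items := List.mem_of_find?_eq_some hfd
              have hky : kv.1 ∈ d.keys := PySem.Dict.mem_keys_of_mem_items d hmem
              rw [← hEq] at hky
              exact absurd ((PySem.Dict.contains_iff_mem_keys d t).mpr hky) (by simp [hc'])
            simp [pvCollect, hkt]
        | none =>
            simp only [Option.none_or]
            by_cases ht : PySem.Str.isIn t pn
            · simp only [List.find?_cons, ht]
              simp [pvCollect]
            · have ht' : PySem.Str.isIn t pn = false := Bool.eq_false_iff.mpr ht
              simp only [List.find?_cons, ht']
              cases hre : rest.find? (fun e => PySem.Str.isIn e.2.1 pn) with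
              | none => rfl
              | some e' =>
                  have hne : t ≠ e'.2.1 := by
                    intro hEq
                    have hp := List.find?_some hre
                    simp only at hp
                    rw [← hEq] at hp
                    exact ht hp
                  simp [pvCollect, hne]

-- ===== VERDICT (by name: the statement is the Claim_ definition above) =====
theorem expected_shard_count_py_spec : Claim_equal_expected_shard_count_py := by
  intro pn pm _
  unfold Spec_expected_shard_count_py expected_shard_count_py expected_shard_count_py_alt pvBuildIndex
  rw [pvKey pn pm PySem.Dict.empty (by simp), pvFindTarget_eq_find]
  cases hf : pm.find? (fun e => PySem.Str.isIn e.2.1 pn) with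
  | none => simp [PySem.Dict.empty]
  | some e =>
      simp only [PySem.Dict.empty, Option.map_some]
      have hne := pvCollect_ne_nil_of_mem e.2.1 pm PySem.Set.empty e (List.mem_of_find?_eq_some hf) rfl
      simp only [PySem.Set.empty] at hne
      simp [List.isEmpty_iff, hne]
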